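-- pv_equiv track=rewrite | github.com/epfl-dlab/multilingual-entity-insertion | data_modelling/baselines/fuzzy_match.py | rank_contexts
-- ===== SOURCE A (Python) =====
-- def edit_distance(s1, s2):
--     """
--     Compute the edit distance between two strings.
--     """
--     m = len(s1)
--     n = len(s2)
--     dp = [[0 for x in range(n + 1)] for x in range(m + 1)]
--     for i in range(m + 1):
--         for j in range(n + 1):
--             # If first string is empty, only option is to
--             # insert all characters of second string
--             if i == 0:
--                 dp[i][j] = j
--             # If second string is empty, only option is to
--             # remove all characters of second string
--             elif j == 0:
--                 dp[i][j] = i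
--             # If last characters are same, ignore last char
--             # and recur for remaining string
--             elif s1[i - 1] == s2[j - 1]:
--                 dp[i][j] = dp[i - 1][j - 1]
--             # If the last character is different, consider all
--             # possibilities and find the minimum
--             else:
--                 dp[i][j] = 1 + min(
--                     dp[i][j - 1],  # Insert
--                     dp[i - 1][j],  # Remove
--                     dp[i - 1][j - 1],  # Replace
--                 )
--     return dp[m][n]
--
-- def rank_contexts(contexts, target_mentions):
--     scores = []
--     mentions_words = {}
--     contexts_words = []
--     for mention in target_mentions:
--         words = mention.lower().split()
--         if len(words) in mentions_words:
--             mentions_words[len(words)].append(words)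
--         else:
--             mentions_words[len(words)] = [words]
--
--     for context in contexts:
--         lines = context.split('\n')
--         words = []
--         for line in lines:
--             words.extend(line.lower().split())
--         temp = {}
--         for key in mentions_words:
--             temp[key] = []
--             # add all key-grams to temp[key]
--             for i in range(len(words) - key + 1):
--                 temp[key].append(words[i:i+key])
--         contexts_words.append(temp)
--
--     for i in range(len(contexts_words)):
--         score = 0
--         for key in mentions_words:
--             for mention in mentions_words[key]:
--                 for gram in contexts_words[i][key]:
--                     if edit_distance(' '.join(mention), ' '.join(gram)) <= 4:
--                         score += 1
--
--         scores.append(score)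
--     return scores
-- ===== SOURCE B (Python) =====
-- def within_distance(s1, s2, i, j, k):
--     """True iff the edit distance of s1[:i] and s2[:j] is at most k.
--
--     Threshold (Ukkonen-style) recursion: give up at once when the length
--     difference alone exceeds the budget, peel matching tail characters in a
--     loop, and branch on the three edit operations only on a mismatch, with
--     the budget k decreasing -- so at most O(3^k * L) work per pair instead
--     of filling an (m+1)x(n+1) table."""
--     if abs(i - j) > k:
--         return False
--     while i and j and s1[i - 1] == s2[j - 1]:
--         i -= 1
--         j -= 1
--     if i == 0:
--         return j <= k
--     if j == 0:
--         return i <= k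
--     if k == 0:
--         return False
--     return (within_distance(s1, s2, i - 1, j, k - 1)
--             or within_distance(s1, s2, i, j - 1, k - 1)
--             or within_distance(s1, s2, i - 1, j - 1, k - 1))
--
-- def rank_contexts(contexts, target_mentions):
--     mentions = []
--     for m in target_mentions:
--         w = m.lower().split()
--         mentions.append((len(w), ' '.join(w)))
--     scores = []
--     for context in contexts:
--         words = [w for line in context.split('\n') for w in line.lower().split()]
--         score = 0
--         for k, target in mentions:
--             for i in range(len(words) - k + 1):
--                 gram = ' '.join(words[i:i + k])
--                 if within_distance(target, gram, len(target), len(gram), 4):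
--                     score += 1
--         scores.append(score)
--     return scores
-- ===== Notes on version B (the rewrite author's own statement) =====
-- stated objective: alternative
-- what changed: replaces the full (m+1)x(n+1) edit-distance DP table by a threshold (Ukkonen-style) recursion - length-difference cutoff, tail-peeling of matching characters, and branching on the three edit operations only on a mismatch with a budget of 4 - answering only 'distance <= 4?'; contexts are scored in one direct pass over (mention, n-gram) pairs instead of prebuilding per-length n-gram dictionaries
import Mathlib
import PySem

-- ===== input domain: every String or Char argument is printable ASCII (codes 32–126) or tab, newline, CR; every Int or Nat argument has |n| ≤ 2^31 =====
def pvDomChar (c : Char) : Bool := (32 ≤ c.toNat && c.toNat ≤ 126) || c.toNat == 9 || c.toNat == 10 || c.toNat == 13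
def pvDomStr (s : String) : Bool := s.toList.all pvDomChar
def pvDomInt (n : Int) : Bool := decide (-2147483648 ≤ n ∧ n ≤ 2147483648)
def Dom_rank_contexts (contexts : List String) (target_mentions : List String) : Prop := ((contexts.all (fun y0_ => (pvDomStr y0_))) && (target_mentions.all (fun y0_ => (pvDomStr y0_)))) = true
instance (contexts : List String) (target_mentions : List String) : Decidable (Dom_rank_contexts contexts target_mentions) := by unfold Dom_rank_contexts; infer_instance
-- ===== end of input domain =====

-- B replaces A's full (m+1)×(n+1) edit-distance DP table by a threshold (Ukkonen-style)
-- recursion (length-difference cutoff, tail-peeling, branching on the three edit operations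
-- only on a mismatch with a budget of 4) answering only "distance ≤ 4?"; contexts are
-- scored in one direct pass over (mention, n-gram) pairs instead of prebuilding per-length
-- n-gram dictionaries; objective: alternative.

-- ===== PORT A =====
-- body of A's inner `for j in range(n + 1)` loop (dp[i][j] assignment)
def editA_inner (l1 l2 : List Char) (i : Int) (dp : List (List Int)) (j : Int) : List (List Int) :=
  let v : Int :=
    if i == 0 then j
    else if j == 0 then i
    else if PySem.List.pyGetD l1 (i-1) ' ' == PySem.List.pyGetD l2 (j-1) ' ' then
      PySem.List.pyGetD (PySem.List.pyGetD dp (i-1) []) (j-1) 0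
    else 1 + min (PySem.List.pyGetD (PySem.List.pyGetD dp i []) (j-1) 0)
             (min (PySem.List.pyGetD (PySem.List.pyGetD dp (i-1) []) j 0)
                  (PySem.List.pyGetD (PySem.List.pyGetD dp (i-1) []) (j-1) 0))
  PySem.List.pySetD dp i (PySem.List.pySetD (PySem.List.pyGetD dp i []) j v)

-- port of A's edit_distance: full (m+1)×(n+1) DP table filled by nested index loops
def editA (s1 s2 : String) : Int :=
  let l1 := s1.toList
  let l2 := s2.toList
  let m : Int := l1.length
  let n : Int := l2.length
  let dp : List (List Int) :=
    (PySem.List.pyRange 0 (m+1) 1).map (fun _ => (PySem.List.pyRange 0 (n+1) 1).map (fun _ => (0:Int)))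
  let dp := (PySem.List.pyRange 0 (m+1) 1).foldl (fun dp i =>
    (PySem.List.pyRange 0 (n+1) 1).foldl (editA_inner l1 l2 i) dp) dp
  PySem.List.pyGetD (PySem.List.pyGetD dp m []) n 0

-- A's first loop body: file one tokenized mention under its word count
def mwStep (d : PySem.Dict Int (List (List String))) (mention : String) :
    PySem.Dict Int (List (List String)) :=
  let words := PySem.Str.split₀ (PySem.Str.lower mention)
  if d.contains (words.length : Int) then
    d.modify (words.length : Int) [] (fun g => g ++ [words])
  else d.insert (words.length : Int) [words]

-- A's first loop: group tokenized mentions by word count in a dict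
def buildMW (target_mentions : List String) : PySem.Dict Int (List (List String)) :=
  target_mentions.foldl mwStep PySem.Dict.empty

-- body of A's `for key in mentions_words` loop while building a context's gram dict
def tempStep (words : List String) (t : PySem.Dict Int (List (List String))) (key : Int) :
    PySem.Dict Int (List (List String)) :=
  let t1 := t.insert key []
  (PySem.List.pyRange 0 ((words.length : Int) - key + 1) 1).foldl (fun t i =>
    t.modify key [] (fun g => g ++ [PySem.List.slice words (some i) (some (i + key))])) t1

def buildTemp (mw : PySem.Dict Int (List (List String))) (context : String) :
    PySem.Dict Int (List (List String)) :=
  let lines := (PySem.Str.split? context "\n").getD []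
  let words := lines.foldl (fun ws line => ws ++ PySem.Str.split₀ (PySem.Str.lower line)) []
  mw.keys.foldl (tempStep words) PySem.Dict.empty

def rank_contexts (contexts : List String) (target_mentions : List String) : List Int :=
  let scores : List Int := []
  let mentions_words := buildMW target_mentions
  let contexts_words : List (PySem.Dict Int (List (List String))) :=
    contexts.foldl (fun acc context => acc ++ [buildTemp mentions_words context]) []
  (PySem.List.pyRange 0 (contexts_words.length : Int) 1).foldl (fun scores i =>
    let score : Int := mentions_words.keys.foldl (fun score key =>
      (mentions_words.getD key []).foldl (fun score mention =>
        ((PySem.List.pyGetD contexts_words i PySem.Dict.empty).getD key []).foldl (fun score gram =>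
          if editA (PySem.Str.join " " mention) (PySem.Str.join " " gram) ≤ 4 then score + 1 else score)
          score) score) 0
    scores ++ [score]) scores

-- ===== PORT B =====
-- B works on the pair of indices (i, j) into (s1, s2), always looking at s1[i-1]/s2[j-1];
-- the port represents s1[:i] and s2[:j] by their REVERSED character lists, so the
-- decrements i-1/j-1 of Source B become taking the tail. Exact on every input.
-- Source B's `while i and j and s1[i-1] == s2[j-1]: i -= 1; j -= 1` loop:
def peelB : List Char → List Char → List Char × List Char
  | a::x, b::y => if a == b then peelB x y else (a::x, b::y)
  | x, y => (x, y)

-- Source B's within_distance: length-difference cutoff, then threshold recursion with the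
-- budget k decreasing on each mismatch branch
def withinB : Nat → List Char → List Char → Bool
  | k, x, y =>
    if k < ((x.length : Int) - (y.length : Int)).natAbs then false
    else match peelB x y with
    | ([], y') => decide (y'.length ≤ k)
    | (x', []) => decide (x'.length ≤ k)
    | (a::x', b::y') =>
      match k with
      | 0 => false
      | k'+1 => withinB k' x' (b::y') || withinB k' (a::x') y' || withinB k' x' y'
termination_by k _ _ => k

-- Source B's call `within_distance(target, gram, len(target), len(gram), 4)`
def okB (s1 s2 : String) : Bool := withinB 4 s1.toList.reverse s2.toList.reverse

-- B's score for one context: one pass over (length, joined mention) pairs and gram starts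
def scoreB (mentions : List (Int × String)) (context : String) : Int :=
  let words := ((PySem.Str.split? context "\n").getD []).flatMap
    (fun line => PySem.Str.split₀ (PySem.Str.lower line))
  mentions.foldl (fun score km =>
    (PySem.List.pyRange 0 ((words.length : Int) - km.1 + 1) 1).foldl (fun score i =>
      if okB km.2 (PySem.Str.join " " (PySem.List.slice words (some i) (some (i + km.1))))
      then score + 1 else score) score) 0

def rank_contexts_alt (contexts : List String) (target_mentions : List String) : List Int :=
  let mentions : List (Int × String) :=
    target_mentions.foldl (fun acc m =>
      let w := PySem.Str.split₀ (PySem.Str.lower m)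
      acc ++ [((w.length : Int), PySem.Str.join " " w)]) []
  contexts.foldl (fun scores context => scores ++ [scoreB mentions context]) []

-- ===== PRECONDITION & SPEC =====
def Spec_rank_contexts (contexts : List String) (target_mentions : List String) (out : List Int) : Prop := out = rank_contexts_alt contexts target_mentions
instance (contexts : List String) (target_mentions : List String) (out : List Int) : Decidable (Spec_rank_contexts contexts target_mentions out) := by unfold Spec_rank_contexts; infer_instance

-- ===== CLAIM (what is proved, stated in full; the proofs are below) =====
def Claim_equal_rank_contexts : Prop := ∀ (contexts : List String) (target_mentions : List String), Dom_rank_contexts contexts target_mentions → Spec_rank_contexts contexts target_mentions (rank_contexts contexts target_mentions)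

-- ===== LEMMAS AND PROOFS =====

-- reference edit distance, recursing on the heads of the REVERSED prefixes
def edD : List Char → List Char → Nat
  | [], y => y.length
  | _::x, [] => x.length + 1
  | a::x, b::y =>
      if a == b then edD x y
      else 1 + min (edD (a::x) y) (min (edD x (b::y)) (edD x y))
termination_by x y => x.length + y.length

theorem edD_nil_left (y : List Char) : edD [] y = y.length := by
  cases y <;> simp [edD]

theorem edD_nil_right (a : Char) (x : List Char) : edD (a::x) [] = x.length + 1 := by
  simp [edD]

theorem edD_cons (a : Char) (x : List Char) (b : Char) (y : List Char) :
    edD (a::x) (b::y) = if a == b then edD x y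
      else 1 + min (edD (a::x) y) (min (edD x (b::y)) (edD x y)) := by
  rw [edD]

-- row i of A's DP table, as edD values on reversed prefixes
def rowD (x b : List Char) : List Int :=
  (List.range (b.length + 1)).map (fun j => ((edD x ((b.take j).reverse) : Nat) : Int))

-- A's row recurrence, as a named function
def nrow (c1 : Char) (b : List Char) (prev : List Int) (i : Int) : List Int :=
  (b.zip (prev.zip prev.tail)).foldl (fun cur q =>
    cur ++ [if c1 == q.1 then q.2.1
            else 1 + min (PySem.List.pyGetD cur (-1) 0) (min q.2.2 q.2.1)]) [i]

-- the sequence of rows (tail-recursive outer loop over s1's characters)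
def buildB (b : List Char) : List Char → List Int → Int → List Int
  | [], prev, _ => prev
  | c :: rest, prev, i => buildB b rest (nrow c b prev i) (i + 1)

-- all rows A's table ends up holding
def rowsA (b : List Char) : List Char → List Int → Int → List (List Int)
  | [], prev, _ => [prev]
  | c :: rest, prev, i => prev :: rowsA b rest (nrow c b prev i) (i + 1)

theorem foldl_append_one_length {α : Type} (f : List Int → α → Int) :
    ∀ (zs : List α) (cur : List Int),
    (zs.foldl (fun cur q => cur ++ [f cur q]) cur).length = cur.length + zs.length := by
  intro zs
  induction zs with
  | nil => simp
  | cons z zt ih => intro cur; simp [ih]; omega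

theorem nrow_length (c : Char) (b : List Char) (prev : List Int) (i : Int)
    (h : prev.length = b.length + 1) : (nrow c b prev i).length = b.length + 1 := by
  unfold nrow
  rw [show (fun (cur : List Int) (q : Char × (Int × Int)) =>
      cur ++ [if c == q.1 then q.2.1
        else 1 + min (PySem.List.pyGetD cur (-1) 0) (min q.2.2 q.2.1)])
    = (fun cur q => cur ++ [(fun (cur : List Int) (q : Char × (Int × Int)) =>
        if c == q.1 then q.2.1
        else 1 + min (PySem.List.pyGetD cur (-1) 0) (min q.2.2 q.2.1)) cur q]) from rfl]
  rw [foldl_append_one_length]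
  simp [List.length_zip, h]
  omega

theorem rowD_length (x b : List Char) : (rowD x b).length = b.length + 1 := by
  simp [rowD]

theorem rowD_get (x b : List Char) (j : Nat) (hj : j < b.length + 1) :
    (rowD x b)[j]'(by simpa [rowD] using hj) = ((edD x ((b.take j).reverse) : Nat) : Int) := by
  simp [rowD]

theorem rowsA_getLast (b : List Char) : ∀ (a : List Char) (prev : List Int) (i : Int),
    (rowsA b a prev i).getLast? = some (buildB b a prev i) := by
  intro a
  induction a with
  | nil => intro prev i; simp [rowsA, buildB]
  | cons c rest ih =>
      intro prev i
      rw [rowsA, buildB, List.getLast?_cons, ih]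
      simp

-- row 0 of A's loop: dp[0][j] = j
theorem innerA_zero (l1 l2 : List Char) (N : Nat) :
    ∀ (r : List Int) (rest : List (List Int)), r.length = N →
    (PySem.List.pyRange 0 (N : Int) 1).foldl (editA_inner l1 l2 0) (r :: rest)
      = PySem.List.pyRange 0 (N : Int) 1 :: rest := by
  intro r rest hr
  rw [PySem.List.pyRange_zero_natCast]
  have key : ∀ q : Nat, q ≤ N →
      ((List.range q).map (fun k : Nat => (k : Int))).foldl (editA_inner l1 l2 0) (r :: rest)
        = ((List.range q).map (fun k : Nat => (k : Int)) ++ r.drop q) :: rest := by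
    intro q
    induction q with
    | zero => intro _; simp
    | succ p ih =>
        intro hp
        rw [List.range_succ, List.map_append, List.foldl_append, ih (by omega)]
        simp only [List.map_cons, List.map_nil, List.foldl_cons, List.foldl_nil]
        unfold editA_inner
        have h0 : PySem.List.pyGetD ((((List.range p).map (fun k : Nat => (k : Int))) ++ r.drop p) :: rest) 0 ([] : List Int)
            = ((List.range p).map (fun k : Nat => (k : Int))) ++ r.drop p := by
          simp [PySem.List.pyGetD_zero_cons]
        simp only [beq_self_eq_true, if_true, h0]
        rw [PySem.List.pySetD_natCast]
        have hset : ((((List.range p).map (fun k : Nat => (k : Int))) ++ r.drop p).set p ((p : Nat) : Int))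
            = (((List.range (p+1)).map (fun k : Nat => (k : Int))) ++ r.drop (p+1)) := by
          rw [List.set_append]
          simp only [List.length_map, List.length_range, lt_irrefl, if_false, Nat.sub_self]
          rw [List.drop_eq_getElem_cons (by omega), List.set_cons_zero]
          rw [List.range_succ, List.map_append]
          simp
        rw [hset]
        have : PySem.List.pySetD ((((List.range p).map (fun k : Nat => (k : Int))) ++ r.drop p) :: rest) 0
            (((List.range (p+1)).map (fun k : Nat => (k : Int))) ++ r.drop (p+1))
            = ((((List.range (p+1)).map (fun k : Nat => (k : Int))) ++ r.drop (p+1)) :: rest) := by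
          rw [show (0 : Int) = ((0 : Nat) : Int) from rfl, PySem.List.pySetD_natCast]
          simp
        rw [this]
        simp [List.range_succ]
  rw [key N (le_refl N)]
  simp [hr]

-- rows 1..m of A's loop compute the row recurrence nrow
theorem innerA_succ (l1 l2 : List Char) (d : Nat) (c : Char) (hc : l1.getD d ' ' = c)
    (pre : List (List Int)) (prev r : List Int) (rest : List (List Int))
    (hpre : pre.length = d) (hprev : prev.length = l2.length + 1) (hr : r.length = l2.length + 1) :
    (PySem.List.pyRange 0 ((l2.length + 1 : Nat) : Int) 1).foldl
        (editA_inner l1 l2 ((d + 1 : Nat) : Int)) (pre ++ prev :: r :: rest)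
      = pre ++ prev :: nrow c l2 prev ((d + 1 : Nat) : Int) :: rest := by
  set n := l2.length with hn
  set I : Int := ((d + 1 : Nat) : Int) with hI
  set zs := l2.zip (prev.zip prev.tail) with hzsdef
  set sfun : List Int → Char × (Int × Int) → List Int := (fun cur q =>
    cur ++ [if c == q.1 then q.2.1
            else 1 + min (PySem.List.pyGetD cur (-1) 0) (min q.2.2 q.2.1)]) with hsfun
  have hzs : zs.length = n := by
    simp [hzsdef, List.length_zip, hprev]
    omega
  have hlen : ∀ (zz : List (Char × (Int × Int))) (cur : List Int),
      (zz.foldl sfun cur).length = cur.length + zz.length := by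
    intro zz cur
    rw [hsfun]
    rw [show (fun (cur : List Int) (q : Char × (Int × Int)) =>
        cur ++ [if c == q.1 then q.2.1
          else 1 + min (PySem.List.pyGetD cur (-1) 0) (min q.2.2 q.2.1)])
      = (fun cur q => cur ++ [(fun (cur : List Int) (q : Char × (Int × Int)) =>
          if c == q.1 then q.2.1
          else 1 + min (PySem.List.pyGetD cur (-1) 0) (min q.2.2 q.2.1)) cur q]) from rfl]
    rw [foldl_append_one_length]
  have hI0 : (I == 0) = false := by simp [hI]; omega
  -- one generic inner step at column q+1
  have step : ∀ q : Nat, q < n →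
      editA_inner l1 l2 I (pre ++ prev :: (((zs.take q).foldl sfun [I]) ++ r.drop (q+1)) :: rest)
          ((q + 1 : Nat) : Int)
        = pre ++ prev :: (((zs.take (q+1)).foldl sfun [I]) ++ r.drop (q+2)) :: rest := by
    intro q hq
    have hplen : ((zs.take q).foldl sfun [I]).length = q + 1 := by
      rw [hlen]; simp; omega
    have e1 : ((q + 1 : Nat) : Int) - 1 = ((q : Nat) : Int) := by push_cast; ring
    have eI1 : I - 1 = ((d : Nat) : Int) := by rw [hI]; push_cast; ring
    have hq0 : (((q + 1 : Nat) : Int) == 0) = false := by simp; omega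
    set part := (zs.take q).foldl sfun [I] with hpart
    set row := part ++ r.drop (q+1) with hrow
    have hrowlen : row.length = n + 1 := by
      rw [hrow]; simp [hplen, hr]; omega
    have get_prev : PySem.List.pyGetD (pre ++ prev :: row :: rest) (I - 1) [] = prev := by
      rw [eI1, PySem.List.pyGetD_natCast, List.getD_eq_getElem?_getD]
      rw [List.getElem?_append_right (by omega)]
      simp [hpre]
    have get_row : PySem.List.pyGetD (pre ++ prev :: row :: rest) I [] = row := by
      rw [hI, PySem.List.pyGetD_natCast, List.getD_eq_getElem?_getD]
      rw [List.getElem?_append_right (by omega)]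
      simp [hpre, show d + 1 - d = 1 from by omega]
    have get_c1 : PySem.List.pyGetD l1 (I - 1) ' ' = c := by
      rw [eI1, PySem.List.pyGetD_natCast, hc]
    have get_c2 : PySem.List.pyGetD l2 (((q + 1 : Nat) : Int) - 1) ' ' = l2[q]'(hq) := by
      rw [e1, PySem.List.pyGetD_natCast, List.getD_eq_getElem?_getD, List.getElem?_eq_getElem hq]
      rfl
    have get_up : PySem.List.pyGetD prev ((q + 1 : Nat) : Int) 0 = prev[q+1]'(by omega) := by
      rw [PySem.List.pyGetD_natCast, List.getD_eq_getElem?_getD, List.getElem?_eq_getElem (by omega)]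
      rfl
    have get_ld : PySem.List.pyGetD prev (((q + 1 : Nat) : Int) - 1) 0 = prev[q]'(by omega) := by
      rw [e1, PySem.List.pyGetD_natCast, List.getD_eq_getElem?_getD, List.getElem?_eq_getElem (by omega)]
      rfl
    have get_last : PySem.List.pyGetD row (((q + 1 : Nat) : Int) - 1) 0 = part[q]'(by omega) := by
      rw [e1, PySem.List.pyGetD_natCast, List.getD_eq_getElem?_getD, hrow]
      rw [List.getElem?_append_left (by omega), List.getElem?_eq_getElem (by omega)]
      rfl
    have hzq : zs[q]'(by omega) = (l2[q]'(hq), (prev[q]'(by omega), prev[q+1]'(by omega))) := by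
      simp only [hzsdef, List.getElem_zip, List.getElem_tail]
    have hpart_ne : part ≠ [] := by
      intro h; rw [h] at hplen; simp at hplen
    have part_last : PySem.List.pyGetD part (-1) 0 = part[q]'(by omega) := by
      rw [PySem.List.pyGetD_neg_one part 0 hpart_ne, List.getLast_eq_getElem]
      congr 1
      omega
    -- the appended value
    set v : Int := if c == l2[q]'(hq) then prev[q]'(by omega)
        else 1 + min (part[q]'(by omega)) (min (prev[q+1]'(by omega)) (prev[q]'(by omega))) with hv
    have hpart_succ : (zs.take (q+1)).foldl sfun [I] = part ++ [v] := by
      rw [List.take_succ, List.getElem?_eq_getElem (by omega), List.foldl_append, ← hpart]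
      simp only [Option.toList_some, List.foldl_cons, List.foldl_nil]
      rw [hsfun]
      simp only [hzq, hv, part_last]
    have hsetrow : PySem.List.pySetD row ((q + 1 : Nat) : Int) v = part ++ v :: r.drop (q+2) := by
      rw [PySem.List.pySetD_natCast, hrow, List.set_append]
      rw [if_neg (by omega)]
      simp only [hplen, Nat.sub_self]
      rw [List.drop_eq_getElem_cons (by omega : q + 1 < r.length), List.set_cons_zero]
    have hsetdp : PySem.List.pySetD (pre ++ prev :: row :: rest) I (part ++ v :: r.drop (q+2))
        = pre ++ prev :: (part ++ v :: r.drop (q+2)) :: rest := by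
      rw [hI, PySem.List.pySetD_natCast, List.set_append, if_neg (by omega)]
      simp [hpre, show d + 1 - d = 1 from by omega]
    simp only [editA_inner, hI0, hq0, Bool.false_eq_true, if_false, get_c1, get_c2, get_prev,
      get_row, get_up, get_ld, get_last]
    rw [← hv, hsetrow, hsetdp, hpart_succ]
    simp
  -- the induction over columns
  have key : ∀ q : Nat, q ≤ n →
      ((List.range (q+1)).map (fun k : Nat => (k : Int))).foldl (editA_inner l1 l2 I)
          (pre ++ prev :: r :: rest)
        = pre ++ prev :: (((zs.take q).foldl sfun [I]) ++ r.drop (q+1)) :: rest := by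
    intro q
    induction q with
    | zero =>
        intro _
        have h01 : (List.range (0+1)).map (fun k : Nat => (k : Int)) = [(0 : Int)] := by simp
        rw [h01, List.foldl_cons, List.foldl_nil]
        have get_r : PySem.List.pyGetD (pre ++ prev :: r :: rest) I [] = r := by
          rw [hI, PySem.List.pyGetD_natCast, List.getD_eq_getElem?_getD]
          rw [List.getElem?_append_right (by omega)]
          simp [hpre, show d + 1 - d = 1 from by omega]
        have hset0 : PySem.List.pySetD r (0 : Int) I = I :: r.drop 1 := by
          rw [show (0 : Int) = ((0 : Nat) : Int) from rfl, PySem.List.pySetD_natCast]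
          rw [List.set_eq_take_append_cons_drop, if_pos (by omega)]
          simp
        have hsetdp : PySem.List.pySetD (pre ++ prev :: r :: rest) I (I :: r.drop 1)
            = pre ++ prev :: (I :: r.drop 1) :: rest := by
          rw [hI, PySem.List.pySetD_natCast, List.set_append, if_neg (by omega)]
          simp [hpre, show d + 1 - d = 1 from by omega]
        simp only [editA_inner, hI0, Bool.false_eq_true, if_false, beq_self_eq_true, if_true,
          get_r, hset0, hsetdp]
        simp
    | succ p ih =>
        intro hp
        rw [List.range_succ, List.map_append, List.foldl_append, ih (by omega)]
        simp only [List.map_cons, List.map_nil, List.foldl_cons, List.foldl_nil]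
        exact step p (by omega)
  -- assemble
  rw [PySem.List.pyRange_zero_natCast, key n (le_refl n)]
  have : zs.take n = zs := by rw [List.take_of_length_le (by omega)]
  rw [this, show r.drop (n+1) = [] from List.drop_of_length_le (by omega)]
  simp [nrow, hsfun, hzsdef]

theorem rowsA_length (b : List Char) : ∀ (a : List Char) (prev : List Int) (i : Int),
    (rowsA b a prev i).length = a.length + 1 := by
  intro a
  induction a with
  | nil => intro prev i; simp [rowsA]
  | cons c rest ih => intro prev i; simp [rowsA, ih]

theorem pyRange_len (N : Nat) : (PySem.List.pyRange 0 (N : Int) 1).length = N := by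
  rw [PySem.List.pyRange_zero_natCast]; simp

theorem outerA (l1 l2 : List Char) (Z : List Int) (hZ : Z.length = l2.length + 1) :
    ∀ (rem con : List Char) (done : List (List Int)) (prev : List Int),
    l1 = con ++ rem → done.length = con.length → prev.length = l2.length + 1 →
    (PySem.List.pyRange ((con.length : Int) + 1) ((l1.length : Int) + 1) 1).foldl
      (fun dp i => (PySem.List.pyRange 0 ((l2.length : Int) + 1) 1).foldl (editA_inner l1 l2 i) dp)
      (done ++ prev :: List.replicate rem.length Z)
    = done ++ rowsA l2 rem prev ((con.length : Int) + 1) := by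
  intro rem
  induction rem with
  | nil =>
      intro con done prev hl1 hdone hprev
      have hlen : l1.length = con.length := by rw [hl1]; simp
      have hempty : PySem.List.pyRange ((con.length : Int) + 1) ((l1.length : Int) + 1) 1 = [] := by
        rw [hlen]
        simp [PySem.List.pyRange]
      rw [hempty]
      simp [rowsA]
  | cons c rest ih =>
      intro con done prev hl1 hdone hprev
      have hlen : l1.length = con.length + rest.length + 1 := by rw [hl1]; simp; omega
      have hcons : PySem.List.pyRange ((con.length : Int) + 1) ((l1.length : Int) + 1) 1
          = ((con.length : Int) + 1) :: PySem.List.pyRange ((con.length : Int) + 1 + 1) ((l1.length : Int) + 1) 1 := by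
        rw [PySem.List.pyRange_one_cons (by push_cast [hlen]; omega)]
      rw [hcons, List.foldl_cons]
      have hc : l1.getD con.length ' ' = c := by
        rw [hl1, List.getD_eq_getElem?_getD, List.getElem?_append_right (by omega)]
        simp
      have e2 : ((con.length : Int) + 1) = ((con.length + 1 : Nat) : Int) := by push_cast; ring
      have e3 : ((l2.length : Int) + 1) = ((l2.length + 1 : Nat) : Int) := by push_cast; ring
      simp only [List.length_cons]
      rw [List.replicate_succ, e2, e3]
      rw [innerA_succ l1 l2 con.length c hc done prev Z (List.replicate rest.length Z) hdone hprev hZ]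
      have estep : done ++ prev :: nrow c l2 prev ((con.length + 1 : Nat) : Int) :: List.replicate rest.length Z
          = (done ++ [prev]) ++ nrow c l2 prev ((con.length + 1 : Nat) : Int) :: List.replicate rest.length Z := by
        simp
      rw [estep]
      have ihx := ih (con ++ [c]) (done ++ [prev]) (nrow c l2 prev ((con.length + 1 : Nat) : Int))
        (by rw [hl1]; simp) (by simp [hdone]) (nrow_length _ _ _ _ hprev)
      have e4 : (((con ++ [c]).length : Nat) : Int) = ((con.length + 1 : Nat) : Int) := by simp
      rw [e4, e3] at ihx
      rw [ihx]
      simp [rowsA]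

-- row 0 of the table is rowD [] l2
theorem row0_eq_rowD (b : List Char) :
    PySem.List.pyRange 0 ((b.length : Int) + 1) 1 = rowD [] b := by
  have e3 : ((b.length : Int) + 1) = ((b.length + 1 : Nat) : Int) := by push_cast; ring
  rw [e3, PySem.List.pyRange_zero_natCast, rowD]
  apply List.map_congr_left
  intro j hj
  rw [List.mem_range] at hj
  rw [edD_nil_left]
  simp
  omega

-- nrow maps row i-1 to row i of edD values
theorem nrow_rowD (c : Char) (b x : List Char) :
    nrow c b (rowD x b) ((x.length + 1 : Nat) : Int) = rowD (c::x) b := by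
  unfold nrow
  set prev := rowD x b with hprevdef
  have hprevlen : prev.length = b.length + 1 := rowD_length x b
  set i : Int := ((x.length + 1 : Nat) : Int) with hidef
  set zs := b.zip (prev.zip prev.tail) with hzsdef
  set sfun : List Int → Char × (Int × Int) → List Int := (fun cur q =>
    cur ++ [if c == q.1 then q.2.1
            else 1 + min (PySem.List.pyGetD cur (-1) 0) (min q.2.2 q.2.1)]) with hsfun
  set f : Nat → Int := fun j => ((edD (c::x) ((b.take j).reverse) : Nat) : Int) with hf
  have hzslen : zs.length = b.length := by
    simp [hzsdef, List.length_zip, hprevlen]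
  have key : ∀ t : Nat, t ≤ b.length →
      (zs.take t).foldl sfun [i] = (List.range (t+1)).map f := by
    intro t
    induction t with
    | zero =>
        intro _
        simp only [List.take_zero, List.foldl_nil]
        have : f 0 = i := by
          simp [hf, hidef, edD_nil_right]
        simp [this]
    | succ t ih =>
        intro ht
        rw [List.take_succ, List.getElem?_eq_getElem (by omega), List.foldl_append,
          ih (by omega)]
        simp only [Option.toList_some, List.foldl_cons, List.foldl_nil]
        have hzq : zs[t]'(by omega) = (b[t]'(by omega), (prev[t]'(by omega), prev[t+1]'(by omega))) := by
          simp only [hzsdef, List.getElem_zip, List.getElem_tail]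
        have hprev_t : prev[t]'(by omega) = ((edD x ((b.take t).reverse) : Nat) : Int) :=
          rowD_get x b t (by omega)
        have hprev_t1 : prev[t+1]'(by omega) = ((edD x ((b.take (t+1)).reverse) : Nat) : Int) :=
          rowD_get x b (t+1) (by omega)
        have hcur_ne : (List.range (t+1)).map f ≠ [] := by simp
        have hcur_last : PySem.List.pyGetD ((List.range (t+1)).map f) (-1) 0 = f t := by
          rw [PySem.List.pyGetD_neg_one _ _ hcur_ne, List.getLast_eq_getElem]
          simp
        have htake : (b.take (t+1)).reverse = b[t]'(by omega) :: (b.take t).reverse := by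
          rw [List.take_succ, List.getElem?_eq_getElem (by omega)]
          simp
        have hval : sfun ((List.range (t+1)).map f) (zs[t]'(by omega))
            = (List.range (t+1)).map f ++ [f (t+1)] := by
          rw [hsfun]
          simp only [hzq, hcur_last]
          congr 1
          have hft1 : f (t+1) = ((edD (c::x) (b[t]'(by omega) :: (b.take t).reverse) : Nat) : Int) := by
            simp only [hf]
            rw [htake]
          rw [hft1, edD_cons]
          by_cases hcb : c = b[t]'(by omega)
          · rw [if_pos (by simp [hcb]), if_pos (by simp [hcb]), hprev_t]
          · rw [if_neg (by simp [hcb]), if_neg (by simp [hcb])]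
            rw [hprev_t, hprev_t1]
            simp only [hf]
            rw [htake]
            push_cast [Nat.cast_min]
            ring_nf
        rw [hval, show List.range (t+1+1) = List.range (t+1) ++ [t+1] from List.range_succ,
          List.map_append]
        simp
  have hfin := key b.length (le_refl _)
  rw [List.take_of_length_le (by omega)] at hfin
  rw [hfin, rowD]

-- the outer loop produces the rowD rows
theorem buildB_rowD (b : List Char) : ∀ (a x : List Char),
    buildB b a (rowD x b) ((x.length + 1 : Nat) : Int) = rowD (a.reverse ++ x) b := by
  intro a
  induction a with
  | nil => intro x; simp [buildB]
  | cons c rest ih =>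
      intro x
      rw [buildB, nrow_rowD]
      have e : ((x.length + 1 : Nat) : Int) + 1 = (((c::x).length + 1 : Nat) : Int) := by
        simp
      rw [e, ih (c::x)]
      congr 1
      simp

-- A's edit_distance equals the recursive edit distance of the reversed strings
theorem editA_eq_edD (s1 s2 : String) :
    editA s1 s2 = ((edD s1.toList.reverse s2.toList.reverse : Nat) : Int) := by
  simp only [editA]
  set l1 := s1.toList with hl1
  set l2 := s2.toList with hl2
  set row0 : List Int := PySem.List.pyRange 0 ((l2.length : Int) + 1) 1 with hrow0
  have e3 : ((l2.length : Int) + 1) = ((l2.length + 1 : Nat) : Int) := by push_cast; ring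
  have em : ((l1.length : Int) + 1) = ((l1.length + 1 : Nat) : Int) := by push_cast; ring
  have hrow0len : row0.length = l2.length + 1 := by
    rw [hrow0, e3, pyRange_len]
  set zrow : List Int := (PySem.List.pyRange 0 ((l2.length : Int) + 1) 1).map (fun _ => (0:Int)) with hzrow
  have hzrowlen : zrow.length = l2.length + 1 := by
    rw [hzrow]
    simp only [List.length_map]
    rw [e3, pyRange_len]
  have hdp0 : (PySem.List.pyRange 0 ((l1.length : Int) + 1) 1).map
      (fun _ => (PySem.List.pyRange 0 ((l2.length : Int) + 1) 1).map (fun _ => (0:Int)))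
      = List.replicate (l1.length + 1) zrow := by
    rw [List.map_const']
    rw [em, pyRange_len, hzrow]
  have hsplit : PySem.List.pyRange 0 ((l1.length : Int) + 1) 1
      = 0 :: PySem.List.pyRange 1 ((l1.length : Int) + 1) 1 := by
    rw [PySem.List.pyRange_one_cons (by push_cast; omega)]
    norm_num
  rw [hdp0, hsplit, List.foldl_cons]
  have hrep : List.replicate (l1.length + 1) zrow = zrow :: List.replicate l1.length zrow := by
    rw [List.replicate_succ]
  rw [hrep]
  have hzero := innerA_zero l1 l2 (l2.length + 1) zrow (List.replicate l1.length zrow) hzrowlen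
  rw [← e3] at hzero
  rw [hzero, ← hrow0]
  have hout := outerA l1 l2 zrow hzrowlen l1 [] [] row0 rfl rfl hrow0len
  simp only [List.length_nil, Nat.cast_zero, List.nil_append] at hout
  have e01 : ((0 : Int) + 1) = 1 := by norm_num
  rw [e01] at hout
  rw [← hrow0] at hout
  rw [hout]
  -- the last row is rowD (l1.reverse) l2
  have hrow0D : row0 = rowD [] l2 := by rw [hrow0, row0_eq_rowD]
  have h1cast : (1 : Int) = ((([] : List Char).length + 1 : Nat) : Int) := by simp
  have hbuild : buildB l2 l1 row0 1 = rowD l1.reverse l2 := by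
    rw [hrow0D, h1cast, buildB_rowD]
    simp
  have hrows := rowsA_getLast l2 l1 row0 1
  have hrowsl := rowsA_length l2 l1 row0 1
  have h1 : PySem.List.pyGetD (rowsA l2 l1 row0 1) ((l1.length : Nat) : Int) []
      = buildB l2 l1 row0 1 := by
    rw [PySem.List.pyGetD_natCast, List.getD_eq_getElem?_getD]
    have : (rowsA l2 l1 row0 1)[(l1.length : Nat)]? = (rowsA l2 l1 row0 1).getLast? := by
      rw [List.getLast?_eq_getElem?, hrowsl]
      simp
    rw [this, hrows]
    rfl
  rw [h1, hbuild]
  have hget : PySem.List.pyGetD (rowD l1.reverse l2) ((l2.length : Nat) : Int) 0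
      = ((edD l1.reverse ((l2.take l2.length).reverse) : Nat) : Int) := by
    rw [PySem.List.pyGetD_natCast, List.getD_eq_getElem?_getD,
      List.getElem?_eq_getElem (by rw [rowD_length]; omega), Option.getD_some]
    exact rowD_get l1.reverse l2 l2.length (by omega)
  rw [hget, List.take_of_length_le (le_refl _)]

-- ---- correctness of the threshold recursion ----

theorem peelB_nil_left (y : List Char) : peelB [] y = ([], y) := by
  cases y <;> simp [peelB]

theorem peelB_nil_right (a : Char) (x : List Char) : peelB (a::x) [] = (a::x, []) := by
  simp [peelB]

theorem peelB_cons (a : Char) (x : List Char) (b : Char) (y : List Char) :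
    peelB (a::x) (b::y) = if a == b then peelB x y else (a::x, b::y) := by
  simp [peelB]

-- peeling a common head run preserves edD
theorem peelB_edD : ∀ (x y : List Char), edD (peelB x y).1 (peelB x y).2 = edD x y := by
  intro x
  induction x with
  | nil => intro y; rw [peelB_nil_left]
  | cons a x ih =>
      intro y
      cases y with
      | nil => rw [peelB_nil_right]
      | cons b y =>
          rw [peelB_cons]
          by_cases hab : a = b
          · rw [if_pos (by simp [hab]), ih y, edD_cons, if_pos (by simp [hab])]
          · rw [if_neg (by simp [hab])]

-- when peelB stops with two nonempty lists, their heads differ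
theorem peelB_mismatch : ∀ (x y : List Char) (a : Char) (x' : List Char) (b : Char) (y' : List Char),
    peelB x y = (a::x', b::y') → (a == b) = false := by
  intro x
  induction x with
  | nil =>
      intro y a x' b y' h
      rw [peelB_nil_left] at h
      simp at h
  | cons a0 x ih =>
      intro y a x' b y' h
      cases y with
      | nil =>
          rw [peelB_nil_right] at h
          simp at h
      | cons b0 y =>
          rw [peelB_cons] at h
          by_cases hab : a0 = b0
          · rw [if_pos (by simp [hab])] at h
            exact ih y a x' b y' h
          · rw [if_neg (by simp [hab])] at h
            obtain ⟨h1, h2⟩ := Prod.mk.injEq .. ▸ h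
            simp at h
            obtain ⟨⟨ha, _⟩, hb, _⟩ := h
            subst ha; subst hb
            simp [hab]

-- the edit distance is at least the length difference
theorem edD_ge_diff_fuel : ∀ (n : Nat) (x y : List Char), x.length + y.length ≤ n →
    ((x.length : Int) - (y.length : Int)).natAbs ≤ edD x y := by
  intro n
  induction n with
  | zero =>
      intro x y h
      have hx : x = [] := by cases x <;> simp_all
      have hy : y = [] := by cases y <;> simp_all
      subst hx; subst hy
      simp [edD_nil_left]
  | succ n ih =>
      intro x y h
      cases x with
      | nil => rw [edD_nil_left]; simp
      | cons a x =>
          cases y with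
          | nil => rw [edD_nil_right]; simp; omega
          | cons b y =>
              rw [edD_cons]
              have h1 := ih (a::x) y (by simp at h ⊢; omega)
              have h2 := ih x (b::y) (by simp at h ⊢; omega)
              have h3 := ih x y (by simp at h ⊢; omega)
              by_cases hab : a = b
              · rw [if_pos (by simp [hab])]
                simp only [List.length_cons] at h3 ⊢
                omega
              · rw [if_neg (by simp [hab])]
                simp only [List.length_cons] at h1 h2 h3 ⊢
                omega

theorem edD_ge_diff (x y : List Char) :
    ((x.length : Int) - (y.length : Int)).natAbs ≤ edD x y :=
  edD_ge_diff_fuel (x.length + y.length) x y (le_refl _)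

-- a mismatch costs at least one edit
theorem edD_pos (a : Char) (x : List Char) (b : Char) (y : List Char) (h : (a == b) = false) :
    1 ≤ edD (a::x) (b::y) := by
  rw [edD_cons, if_neg (by simp_all)]
  omega

-- the threshold recursion decides "edD ≤ k"
theorem withinB_correct : ∀ (k : Nat) (x y : List Char), withinB k x y = decide (edD x y ≤ k) := by
  intro k
  induction k with
  | zero =>
      intro x y
      rw [withinB]
      by_cases hg : 0 < ((x.length : Int) - (y.length : Int)).natAbs
      · rw [if_pos hg]
        have := edD_ge_diff x y
        rw [eq_comm, decide_eq_false_iff_not]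
        omega
      rw [if_neg hg]
      rcases hp : peelB x y with ⟨px, py⟩
      have hed : edD px py = edD x y := by rw [← peelB_edD x y, hp]
      cases px with
      | nil =>
          simp only []
          rw [← hed, edD_nil_left]
      | cons a x' =>
          cases py with
          | nil =>
              simp only []
              rw [← hed, edD_nil_right]
              simp
          | cons b y' =>
              have hne := peelB_mismatch x y a x' b y' hp
              have h1 := edD_pos a x' b y' hne
              rw [← hed]
              simp only []
              rw [eq_comm, decide_eq_false_iff_not]
              omega
  | succ k ih =>
      intro x y
      rw [withinB]
      by_cases hg : k + 1 < ((x.length : Int) - (y.length : Int)).natAbs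
      · rw [if_pos hg]
        have := edD_ge_diff x y
        rw [eq_comm, decide_eq_false_iff_not]
        omega
      rw [if_neg hg]
      rcases hp : peelB x y with ⟨px, py⟩
      have hed : edD px py = edD x y := by rw [← peelB_edD x y, hp]
      cases px with
      | nil =>
          simp only []
          rw [← hed, edD_nil_left]
      | cons a x' =>
          cases py with
          | nil =>
              simp only []
              rw [← hed, edD_nil_right]
              rw [Bool.eq_iff_iff]
              simp only [decide_eq_true_eq, List.length_cons]
          | cons b y' =>
              have hne := peelB_mismatch x y a x' b y' hp
              simp only []
              rw [ih x' (b::y'), ih (a::x') y', ih x' y', ← hed, edD_cons,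
                if_neg (by simp_all)]
              rw [Bool.eq_iff_iff]
              simp only [Bool.or_eq_true, decide_eq_true_eq]
              omega

-- A's threshold test equals B's boolean
theorem cond_eq (s1 s2 : String) : (editA s1 s2 ≤ 4) = (okB s1 s2 = true) := by
  apply propext
  rw [editA_eq_edD]
  unfold okB
  rw [withinB_correct]
  simp only [decide_eq_true_eq]
  exact_mod_cast Iff.rfl

-- ---- tokenization / gram abbreviations (proof-side) ----

def tok (s : String) : List String := PySem.Str.split₀ (PySem.Str.lower s)

def wordsOf (context : String) : List String :=
  ((PySem.Str.split? context "\n").getD []).flatMap (fun line => tok line)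

def grams (words : List String) (key : Int) : List (List String) :=
  (PySem.List.pyRange 0 ((words.length : Int) - key + 1) 1).map
    (fun i => PySem.List.slice words (some i) (some (i + key)))

-- total score a dict of mention groups contributes, F applied to (group key, mention)
def SF (F : Int → List String → Int) (d : PySem.Dict Int (List (List String))) : Int :=
  (d.items.map (fun kg => ((kg.2.map (fun m => F kg.1 m)).sum))).sum

theorem keys_replace {ν : Type} (k : Int) (v : ν) (items : List (Int × ν)) :
    ((items.map (fun p => if p.1 == k then (k, v) else p)).map Prod.fst) = items.map Prod.fst := by
  induction items with
  | nil => rfl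
  | cons p rest ih =>
      by_cases h : p.1 = k
      · have hb : (p.1 == k) = true := by simp [h]
        simp only [List.map_cons, hb, if_true]
        rw [ih]
        simp [h]
      · have hb : (p.1 == k) = false := by simp [h]
        simp only [List.map_cons, hb, Bool.false_eq_true, if_false]
        rw [ih]

theorem get?_isSome_of_contains {ν : Type} (items : List (Int × ν)) (k : Int)
    (hc : (PySem.Dict.mk items).contains k = true) :
    ∃ g, (PySem.Dict.mk items).get? k = some g := by
  have hfind : (items.find? (fun p => p.1 == k)).isSome = true := by
    rw [List.find?_isSome]
    simpa [PySem.Dict.contains] using hc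
  cases hf : items.find? (fun p => p.1 == k) with
  | none => rw [hf] at hfind; simp at hfind
  | some pr => exact ⟨pr.2, by simp [PySem.Dict.get?, hf]⟩

theorem repl_sum (F : Int → List String → Int) (k : Int) (w : List String) :
    ∀ (items : List (Int × List (List String))), (items.map Prod.fst).Nodup →
    ∀ g, (PySem.Dict.mk items).get? k = some g →
    ((items.map (fun p => if p.1 == k then (k, g ++ [w]) else p)).map
        (fun kg => ((kg.2.map (fun m => F kg.1 m)).sum))).sum
      = (items.map (fun kg => ((kg.2.map (fun m => F kg.1 m)).sum))).sum + F k w := by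
  intro items
  induction items with
  | nil => intro _ g hg; simp [PySem.Dict.get?] at hg
  | cons p rest ih =>
      intro hnd g hg
      simp only [List.map_cons, List.nodup_cons] at hnd
      obtain ⟨hnotin, hndrest⟩ := hnd
      rw [PySem.Dict.get?_mk_cons] at hg
      by_cases h : p.1 = k
      · rw [h] at hnotin
        simp only [h, beq_self_eq_true, if_true] at hg
        obtain rfl : p.2 = g := by injection hg
        simp only [List.map_cons, List.sum_cons, beq_self_eq_true, if_true, h]
        have hrest2 : rest.map (fun q => if q.1 == k then (k, p.2 ++ [w]) else q) = rest.map id := by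
          apply List.map_congr_left
          intro q hq
          have hqk : ¬ q.1 = k := by
            intro e
            exact hnotin (e ▸ List.mem_map_of_mem hq)
          simp [hqk]
        rw [hrest2, List.map_id]
        simp only [List.map_append, List.sum_append, List.map_cons, List.map_nil, List.sum_cons,
          List.sum_nil]
        ring
      · have hb : (p.1 == k) = false := by simp [h]
        rw [hb] at hg
        simp only [Bool.false_eq_true, if_false] at hg
        simp only [List.map_cons, List.sum_cons, hb, Bool.false_eq_true, if_false]
        rw [ih hndrest g hg]
        ring

theorem S_mwStep (F : Int → List String → Int) (d : PySem.Dict Int (List (List String)))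
    (mention : String) (hnd : (d.items.map Prod.fst).Nodup) :
    SF F (mwStep d mention)
      = SF F d + F (((tok mention).length : Nat) : Int) (tok mention) := by
  unfold mwStep
  set w := PySem.Str.split₀ (PySem.Str.lower mention) with hw
  have hwtok : w = tok mention := rfl
  by_cases hc : d.contains ((w.length : Nat) : Int) = true
  · obtain ⟨g, hg⟩ := get?_isSome_of_contains d.items _ hc
    rw [if_pos hc]
    unfold PySem.Dict.modify
    have hgetD : d.getD ((w.length : Nat) : Int) [] = g := by
      simp [PySem.Dict.getD, hg]
    rw [hgetD]
    unfold PySem.Dict.insert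
    rw [if_pos hc]
    unfold SF
    rw [repl_sum F _ w d.items hnd g hg, hwtok]
  · rw [if_neg hc]
    unfold PySem.Dict.insert
    rw [if_neg hc]
    unfold SF
    simp only [List.map_append, List.sum_append, List.map_cons, List.map_nil, List.sum_cons,
      List.sum_nil, hwtok]
    ring

theorem nodup_mwStep (d : PySem.Dict Int (List (List String))) (mention : String)
    (hnd : (d.items.map Prod.fst).Nodup) :
    (((mwStep d mention).items).map Prod.fst).Nodup := by
  unfold mwStep
  set w := PySem.Str.split₀ (PySem.Str.lower mention) with hw
  by_cases hc : d.contains ((w.length : Nat) : Int) = true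
  · rw [if_pos hc]
    unfold PySem.Dict.modify PySem.Dict.insert
    rw [if_pos hc]
    show (List.map Prod.fst (d.items.map (fun p =>
      if p.1 == ((w.length : Nat) : Int) then (((w.length : Nat) : Int), d.getD _ [] ++ [w]) else p))).Nodup
    rw [keys_replace]
    exact hnd
  · have hknot : ((w.length : Nat) : Int) ∉ d.items.map Prod.fst := by
      intro hmem
      apply hc
      simp only [PySem.Dict.contains, List.any_eq_true]
      obtain ⟨p, hp, hpk⟩ := List.mem_map.mp hmem
      exact ⟨p, hp, by simp [hpk]⟩
    rw [if_neg hc]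
    unfold PySem.Dict.insert
    rw [if_neg hc]
    show (List.map Prod.fst (d.items ++ [(((w.length : Nat) : Int), [w])])).Nodup
    simp only [List.map_append, List.map_cons, List.map_nil]
    rw [List.nodup_append]
    refine ⟨hnd, List.nodup_singleton _, ?_⟩
    intro a ha b hbmem
    rw [List.mem_singleton] at hbmem
    subst hbmem
    intro he
    exact hknot (he ▸ ha)

theorem build_nodup : ∀ (tms : List String) (d : PySem.Dict Int (List (List String))),
    (d.items.map Prod.fst).Nodup → (((tms.foldl mwStep d).items).map Prod.fst).Nodup := by
  intro tms
  induction tms with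
  | nil => intro d h; exact h
  | cons m rest ih => intro d h; exact ih _ (nodup_mwStep d m h)

theorem build_S (F : Int → List String → Int) :
    ∀ (tms : List String) (d : PySem.Dict Int (List (List String))),
    (d.items.map Prod.fst).Nodup →
    SF F (tms.foldl mwStep d)
      = SF F d + (tms.map (fun m => F (((tok m).length : Nat) : Int) (tok m))).sum := by
  intro tms
  induction tms with
  | nil => intro d h; simp
  | cons m rest ih =>
      intro d h
      rw [List.foldl_cons, ih _ (nodup_mwStep d m h), S_mwStep F d m h]
      simp only [List.map_cons, List.sum_cons]
      ring

theorem inner_get?_self (words : List String) (key : Int) :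
    ∀ (l : List Int) (t : PySem.Dict Int (List (List String))) (v : List (List String)),
    t.get? key = some v →
    (l.foldl (fun t i => t.modify key []
        (fun g => g ++ [PySem.List.slice words (some i) (some (i + key))])) t).get? key
      = some (v ++ l.map (fun i => PySem.List.slice words (some i) (some (i + key)))) := by
  intro l
  induction l with
  | nil => intro t v hv; simpa using hv
  | cons i rest ih =>
      intro t v hv
      rw [List.foldl_cons]
      have hstep : (t.modify key [] (fun g => g ++ [PySem.List.slice words (some i) (some (i + key))]))
          = t.insert key (v ++ [PySem.List.slice words (some i) (some (i + key))]) := by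
        unfold PySem.Dict.modify
        have : t.getD key [] = v := by simp [PySem.Dict.getD, hv]
        rw [this]
      rw [hstep, ih _ _ (PySem.Dict.get?_insert_self t key _)]
      simp

theorem inner_get?_other (words : List String) (key k' : Int) (hne : k' ≠ key) :
    ∀ (l : List Int) (t : PySem.Dict Int (List (List String))),
    (l.foldl (fun t i => t.modify key []
        (fun g => g ++ [PySem.List.slice words (some i) (some (i + key))])) t).get? k'
      = t.get? k' := by
  intro l
  induction l with
  | nil => intro t; rfl
  | cons i rest ih =>
      intro t
      rw [List.foldl_cons, ih]
      unfold PySem.Dict.modify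
      exact PySem.Dict.get?_insert_of_ne t _ hne

theorem tempStep_get?_self (words : List String) (t : PySem.Dict Int (List (List String)))
    (key : Int) : (tempStep words t key).get? key = some (grams words key) := by
  unfold tempStep
  rw [inner_get?_self words key _ _ [] (PySem.Dict.get?_insert_self t key [])]
  rfl

theorem tempStep_get?_other (words : List String) (t : PySem.Dict Int (List (List String)))
    (key k' : Int) (hne : k' ≠ key) : (tempStep words t key).get? k' = t.get? k' := by
  unfold tempStep
  rw [inner_get?_other words key k' hne]
  exact PySem.Dict.get?_insert_of_ne t _ hne

theorem foldl_tempStep_preserve (words : List String) (k : Int) :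
    ∀ (ks : List Int) (t : PySem.Dict Int (List (List String))), k ∉ ks →
    (ks.foldl (tempStep words) t).get? k = t.get? k := by
  intro ks
  induction ks with
  | nil => intro t _; rfl
  | cons key rest ih =>
      intro t hk
      rw [List.foldl_cons, ih _ (fun h => hk (List.mem_cons_of_mem _ h))]
      exact tempStep_get?_other words t key k (fun h => hk (h ▸ List.mem_cons_self))

theorem temp_get? (words : List String) :
    ∀ (ks : List Int) (t : PySem.Dict Int (List (List String))) (k : Int),
    k ∈ ks → ks.Nodup →
    (ks.foldl (tempStep words) t).get? k = some (grams words k) := by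
  intro ks
  induction ks with
  | nil => intro t k hk _; simp at hk
  | cons key rest ih =>
      intro t k hk hnd
      rw [List.nodup_cons] at hnd
      rw [List.foldl_cons]
      by_cases he : k = key
      · subst he
        rw [foldl_tempStep_preserve words k rest _ hnd.1]
        exact tempStep_get?_self words t k
      · have : k ∈ rest := by
          rcases List.mem_cons.mp hk with h | h
          · exact absurd h he
          · exact h
        exact ih _ k this hnd.2

theorem sum_keys_items (f : Int → List (List String) → Int) :
    ∀ (items : List (Int × List (List String))), (items.map Prod.fst).Nodup →
    ((items.map Prod.fst).map (fun k => f k ((PySem.Dict.mk items).getD k []))).sum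
      = (items.map (fun kg => f kg.1 kg.2)).sum := by
  intro items
  induction items with
  | nil => intro _; rfl
  | cons p rest ih =>
      obtain ⟨k0, g0⟩ := p
      intro hnd
      simp only [List.map_cons, List.nodup_cons] at hnd ⊢
      obtain ⟨hnotin, hndrest⟩ := hnd
      simp only [List.sum_cons]
      have hhead : (PySem.Dict.mk ((k0, g0) :: rest)).getD k0 [] = g0 := by
        simp [PySem.Dict.getD, PySem.Dict.get?_mk_cons]
      have htail : (rest.map Prod.fst).map (fun k => f k ((PySem.Dict.mk ((k0, g0) :: rest)).getD k []))
          = (rest.map Prod.fst).map (fun k => f k ((PySem.Dict.mk rest).getD k [])) := by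
        apply List.map_congr_left
        intro k hk
        have hne : (k0 == k) = false := by
          simp only [beq_eq_false_iff_ne, ne_eq]
          intro he
          exact hnotin (he ▸ hk)
        simp [PySem.Dict.getD, PySem.Dict.get?_mk_cons, hne]
      rw [hhead, htail, ih hndrest]

theorem sum_keys_items' (f : Int → List (List String) → Int)
    (d : PySem.Dict Int (List (List String))) (hnd : (d.items.map Prod.fst).Nodup) :
    ((d.items.map Prod.fst).map (fun k => f k (d.getD k []))).sum
      = (d.items.map (fun kg => f kg.1 kg.2)).sum := by
  obtain ⟨items⟩ := d
  exact sum_keys_items f items hnd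

theorem map_index {α β : Type} (xs : List α) (d : α) (g : α → β) :
    (PySem.List.pyRange 0 ((xs.length : Nat) : Int) 1).map (fun i => g (PySem.List.pyGetD xs i d))
      = xs.map g := by
  have h' : (PySem.List.pyRange 0 ((xs.length : Nat) : Int) 1).map
      (fun i => PySem.List.pyGetD xs i d) = xs := PySem.List.map_pyGetD_pyRange_zero xs d
  conv_rhs => rw [← h']
  rw [List.map_map]
  rfl

set_option maxHeartbeats 1000000 in
theorem score_eq (tms : List String) (context : String) :
    (buildMW tms).keys.foldl (fun score key =>
      ((buildMW tms).getD key []).foldl (fun score mention =>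
        ((buildTemp (buildMW tms) context).getD key []).foldl (fun score gram =>
          if okB (PySem.Str.join " " mention) (PySem.Str.join " " gram) = true then score + 1
          else score) score) score) 0
    = scoreB (tms.map (fun m =>
        (((PySem.Str.split₀ (PySem.Str.lower m)).length : Int),
          PySem.Str.join " " (PySem.Str.split₀ (PySem.Str.lower m))))) context := by
  have hndfst : ((buildMW tms).items.map Prod.fst).Nodup := by
    unfold buildMW
    exact build_nodup tms PySem.Dict.empty (by simp [PySem.Dict.empty])
  have htemp : ∀ key ∈ (buildMW tms).keys,
      (buildTemp (buildMW tms) context).getD key [] = grams (wordsOf context) key := by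
    intro key hk
    have hkn : (buildMW tms).keys.Nodup := hndfst
    simp only [buildTemp]
    rw [show (((PySem.Str.split? context "\n").getD []).foldl
        (fun ws line => ws ++ PySem.Str.split₀ (PySem.Str.lower line)) ([] : List String))
        = wordsOf context from by
      rw [PySem.List.foldl_append_eq_flatMap]
      rfl]
    simp only [PySem.Dict.getD]
    rw [temp_get? (wordsOf context) (buildMW tms).keys PySem.Dict.empty key hk hkn]
    rfl
  rw [PySem.List.foldl_congr_mem (buildMW tms).keys _
      (fun score key => ((buildMW tms).getD key []).foldl (fun score mention =>
        (grams (wordsOf context) key).foldl (fun score gram =>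
          if okB (PySem.Str.join " " mention) (PySem.Str.join " " gram) = true then score + 1
          else score) score) score) 0
      (by intro acc key hk; rw [htemp key hk])]
  simp only [PySem.List.foldl_ite_add_one, PySem.List.foldl_add, zero_add]
  rw [show (buildMW tms).keys = (buildMW tms).items.map Prod.fst from rfl]
  rw [sum_keys_items' (fun k v => (v.map (fun mention =>
      ((List.countP (fun gram => decide (okB (PySem.Str.join " " mention)
        (PySem.Str.join " " gram) = true)) (grams (wordsOf context) k) : Nat) : Int))).sum)
    (buildMW tms) hndfst]
  have hS := build_S (fun k m =>
      ((List.countP (fun gram => decide (okB (PySem.Str.join " " m)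
        (PySem.Str.join " " gram) = true)) (grams (wordsOf context) k) : Nat) : Int))
    tms PySem.Dict.empty (by simp [PySem.Dict.empty])
  rw [show SF (fun k m =>
      ((List.countP (fun gram => decide (okB (PySem.Str.join " " m)
        (PySem.Str.join " " gram) = true)) (grams (wordsOf context) k) : Nat) : Int))
      PySem.Dict.empty = 0 from rfl, zero_add] at hS
  simp only [SF] at hS
  rw [show (buildMW tms).items = (tms.foldl mwStep PySem.Dict.empty).items from rfl]
  rw [hS]
  -- reduce B's side to the same sum
  have hwB : (((PySem.Str.split? context "\n").getD []).flatMap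
      (fun line => PySem.Str.split₀ (PySem.Str.lower line))) = wordsOf context := rfl
  simp only [scoreB, hwB, PySem.List.foldl_ite_add_one, PySem.List.foldl_add, zero_add,
    List.map_map]
  apply congrArg
  apply List.map_congr_left
  intro m _
  simp only [grams, List.countP_map, tok, Function.comp_def]
  rfl

-- ===== VERDICT (by name: the statement is the Claim_ definition above) =====
set_option maxHeartbeats 1000000 in
theorem rank_contexts_spec : Claim_equal_rank_contexts := by
  unfold Claim_equal_rank_contexts
  intro contexts tms _
  unfold Spec_rank_contexts
  simp only [rank_contexts, rank_contexts_alt]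
  simp only [cond_eq]
  simp only [PySem.List.foldl_append_singleton_eq_map, List.nil_append]
  rw [map_index (contexts.map (buildTemp (buildMW tms))) PySem.Dict.empty
    (fun t => (buildMW tms).keys.foldl (fun score key =>
      ((buildMW tms).getD key []).foldl (fun score mention =>
        (t.getD key []).foldl (fun score gram =>
          if okB (PySem.Str.join " " mention) (PySem.Str.join " " gram) = true then score + 1
          else score) score) score) 0)]
  rw [List.map_map]
  apply List.map_congr_left
  intro context _
  exact score_eq tms context
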